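-- pv_equiv track=rewrite | github.com/AshleyKlibowitz/agentic-unity-logs | Game_Agent.py | tag_risks
-- ===== SOURCE A (Python) =====
-- def tag_risks(level, message):
--     msg = message.lower()
--     if level == "ERROR":
--         if any(s in msg for s in ["nullreference", "null pointer", "crash", "fatal", "critical"]):
--             return "High: Critical Error"
--         if any(s in msg for s in ["buffer overflow", "stack overflow", "security", "vulnerability"]):
--             return "High: Security Risk"
--         return "Medium: General Error"
--     if level == "WARNING":
--         if any(s in msg for s in ["deprecated", "obsolete", "outdated"]):
--             return "Low: Update Recommended"
--         if any(s in msg for s in ["memory", "leak", "performance", "slow", "lag"]):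
--             return "Medium: Performance"
--         return "Low: General Warning"
--     if level == "INFO":
--         if any(s in msg for s in ["success", "ready", "complete", "loaded", "connected", "started"]):
--             return "Info: Success"
--         if any(s in msg for s in ["timeout", "connection failed", "network error", "corrupt"]):
--             return "Medium: Connectivity"
--         return "Info: General"
--     return "Info: Unknown"
-- ===== SOURCE B (Python) =====
-- # Position-driven scanner: instead of testing each substring with `in`, walk the
-- # message once, try every keyword of the level at each start position, and keep
-- # the best (lowest) rule priority seen; the label is picked by that priority.
--
-- KEYWORDS = {
--     "ERROR": [("nullreference", 0), ("null pointer", 0), ("crash", 0),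
--               ("fatal", 0), ("critical", 0),
--               ("buffer overflow", 1), ("stack overflow", 1),
--               ("security", 1), ("vulnerability", 1)],
--     "WARNING": [("deprecated", 0), ("obsolete", 0), ("outdated", 0),
--                 ("memory", 1), ("leak", 1), ("performance", 1),
--                 ("slow", 1), ("lag", 1)],
--     "INFO": [("success", 0), ("ready", 0), ("complete", 0), ("loaded", 0),
--              ("connected", 0), ("started", 0),
--              ("timeout", 1), ("connection failed", 1),
--              ("network error", 1), ("corrupt", 1)],
-- }
--
-- LABELS = {
--     "ERROR": ["High: Critical Error", "High: Security Risk", "Medium: General Error"],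
--     "WARNING": ["Low: Update Recommended", "Medium: Performance", "Low: General Warning"],
--     "INFO": ["Info: Success", "Medium: Connectivity", "Info: General"],
-- }
--
--
-- def tag_risks(level, message):
--     labels = LABELS.get(level)
--     if labels is None:
--         return "Info: Unknown"
--     table = KEYWORDS[level]
--     msg = message.lower()
--     best = len(labels) - 1
--     for i in range(len(msg)):
--         for kw, pri in table:
--             if pri < best and msg.startswith(kw, i):
--                 best = pri
--     return labels[best]
-- ===== Notes on version B (the rewrite author's own statement) =====
-- stated objective: alternative
-- what changed: Instead of testing each keyword with the substring operator per rule group, B scans the message once over start positions, matching every keyword of the level at each position and keeping the minimum rule priority seen, then maps that priority to its label.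
import Mathlib
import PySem

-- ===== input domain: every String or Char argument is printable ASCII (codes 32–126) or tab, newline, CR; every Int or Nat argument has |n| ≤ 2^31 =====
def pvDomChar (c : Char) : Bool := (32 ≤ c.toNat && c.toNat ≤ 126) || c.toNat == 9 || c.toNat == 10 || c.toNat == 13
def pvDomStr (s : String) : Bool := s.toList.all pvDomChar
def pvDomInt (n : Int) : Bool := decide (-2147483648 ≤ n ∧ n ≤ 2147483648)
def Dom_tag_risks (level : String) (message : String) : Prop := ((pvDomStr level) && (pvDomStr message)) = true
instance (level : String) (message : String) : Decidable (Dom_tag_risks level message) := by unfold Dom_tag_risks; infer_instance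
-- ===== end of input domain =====

-- B replaces A's per-substring `in` tests by a single position scan of the message:
-- at each start position it tries every keyword of the level and keeps the best
-- (lowest) rule priority found, then picks the label by that priority (alternative).

-- ===== PORT A =====
def tag_risks (level : String) (message : String) : String :=
  let msg := PySem.Str.lower message
  if level == "ERROR" then
    if (["nullreference", "null pointer", "crash", "fatal", "critical"].any
        (fun s => PySem.Str.isIn s msg)) then "High: Critical Error"
    else if (["buffer overflow", "stack overflow", "security", "vulnerability"].any
        (fun s => PySem.Str.isIn s msg)) then "High: Security Risk"
    else "Medium: General Error"
  else if level == "WARNING" then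
    if (["deprecated", "obsolete", "outdated"].any
        (fun s => PySem.Str.isIn s msg)) then "Low: Update Recommended"
    else if (["memory", "leak", "performance", "slow", "lag"].any
        (fun s => PySem.Str.isIn s msg)) then "Medium: Performance"
    else "Low: General Warning"
  else if level == "INFO" then
    if (["success", "ready", "complete", "loaded", "connected", "started"].any
        (fun s => PySem.Str.isIn s msg)) then "Info: Success"
    else if (["timeout", "connection failed", "network error", "corrupt"].any
        (fun s => PySem.Str.isIn s msg)) then "Medium: Connectivity"
    else "Info: General"
  else "Info: Unknown"

-- ===== PORT B =====
def pvKeywords : PySem.Dict String (List (String × Nat)) :=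
  PySem.Dict.ofList
    [ ("ERROR",
        [("nullreference", 0), ("null pointer", 0), ("crash", 0), ("fatal", 0), ("critical", 0),
         ("buffer overflow", 1), ("stack overflow", 1), ("security", 1), ("vulnerability", 1)]),
      ("WARNING",
        [("deprecated", 0), ("obsolete", 0), ("outdated", 0),
         ("memory", 1), ("leak", 1), ("performance", 1), ("slow", 1), ("lag", 1)]),
      ("INFO",
        [("success", 0), ("ready", 0), ("complete", 0), ("loaded", 0), ("connected", 0), ("started", 0),
         ("timeout", 1), ("connection failed", 1), ("network error", 1), ("corrupt", 1)]) ]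

def pvLabels : PySem.Dict String (List String) :=
  PySem.Dict.ofList
    [ ("ERROR", ["High: Critical Error", "High: Security Risk", "Medium: General Error"]),
      ("WARNING", ["Low: Update Recommended", "Medium: Performance", "Low: General Warning"]),
      ("INFO", ["Info: Success", "Medium: Connectivity", "Info: General"]) ]

-- Source B's `msg.startswith(kw, i)` for 0 ≤ i: exactly `startswith (msg.drop i) kw` (exact here:
-- the loop only uses i in range(len(msg)), where Python's bounded startswith is prefix-of-drop).
def tag_risks_alt (level : String) (message : String) : String :=
  match pvLabels.get? level with
  | none => "Info: Unknown"
  | some labels =>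
    let table := (pvKeywords.get? level).getD []
    let msg := PySem.Chars.lower message.toList
    let best := (List.range msg.length).foldl
      (fun best i => table.foldl
        (fun b kp =>
          if kp.2 < b ∧ PySem.Chars.startswith (msg.drop i) kp.1.toList then kp.2 else b)
        best)
      (labels.length - 1)
    labels.getD best ""

-- ===== PRECONDITION & SPEC =====
def Spec_tag_risks (level : String) (message : String) (out : String) : Prop := out = tag_risks_alt level message
instance (level : String) (message : String) (out : String) : Decidable (Spec_tag_risks level message out) := by unfold Spec_tag_risks; infer_instance

-- ===== CLAIM (what is proved, stated in full; the proofs are below) =====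
def Claim_equal_tag_risks : Prop := ∀ (level : String) (message : String), Dom_tag_risks level message → Spec_tag_risks level message (tag_risks level message)

-- ===== LEMMAS AND PROOFS =====

-- the inner conditional update is a conditional `min`
theorem pv_inner_min (msg : List Char) (i : Nat) (t : List (String × Nat)) (b : Nat) :
    t.foldl (fun b kp => if kp.2 < b ∧ PySem.Chars.startswith (msg.drop i) kp.1.toList then kp.2 else b) b
    = t.foldl (fun b kp => if PySem.Chars.startswith (msg.drop i) kp.1.toList then min b kp.2 else b) b := by
  have hf : (fun (b : Nat) (kp : String × Nat) => if kp.2 < b ∧ PySem.Chars.startswith (msg.drop i) kp.1.toList then kp.2 else b)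
      = (fun b kp => if PySem.Chars.startswith (msg.drop i) kp.1.toList then min b kp.2 else b) := by
    funext b kp
    by_cases hm : PySem.Chars.startswith (msg.drop i) kp.1.toList
    · simp only [hm, and_true, if_true]
      rw [Nat.min_def]
      split_ifs <;> omega
    · simp [hm]
  rw [hf]

-- a conditional-min fold is a plain min fold over the filtered priorities
theorem pv_foldl_min_filterMap (t : List (String × Nat)) (P : String × Nat → Bool) (b : Nat) :
    t.foldl (fun b kp => if P kp then min b kp.2 else b) b
    = (t.filterMap (fun kp => if P kp then some kp.2 else none)).foldl min b := by
  induction t generalizing b with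
  | nil => rfl
  | cons kp t ih => by_cases h : P kp <;> simp [h, ih]

-- nested min folds = min fold over the flattened matches
theorem pv_foldl_foldl_min (idxs : List Nat) (f : Nat → List Nat) (b : Nat) :
    idxs.foldl (fun b i => (f i).foldl min b) b = (idxs.flatMap f).foldl min b := by
  induction idxs generalizing b with
  | nil => rfl
  | cons i idxs ih => simp [List.flatMap_cons, List.foldl_append, ih]

theorem pv_foldl_min_zero (L : List Nat) : L.foldl min 0 = 0 := by
  induction L with
  | nil => rfl
  | cons x L ih => simpa using ih

theorem pv_foldl_min_char (L : List Nat) (b : Nat) (h : ∀ x ∈ L, x = 0 ∨ x = 1)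
    (hb : b = 1 ∨ b = 2) :
    L.foldl min b = if 0 ∈ L then 0 else if 1 ∈ L ∨ b = 1 then 1 else 2 := by
  induction L generalizing b with
  | nil => rcases hb with rfl | rfl <;> simp
  | cons x L ih =>
    rcases h x (List.mem_cons_self) with rfl | rfl
    · simp [List.foldl_cons, pv_foldl_min_zero]
    · have hmin : min b 1 = 1 := by omega
      rw [List.foldl_cons, hmin, ih 1 (fun y hy => h y (List.mem_cons_of_mem _ hy)) (Or.inl rfl)]
      by_cases h0 : (0 : Nat) ∈ L <;> simp [h0]

-- a nonempty keyword occurs at a position < length iff it is a substring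
theorem pv_exists_lt_prefix_iff (msg kw : List Char) (hk : kw ≠ []) :
    (∃ i, i < msg.length ∧ kw <+: msg.drop i) ↔ PySem.Chars.isIn kw msg = true := by
  rw [← PySem.Chars.exists_prefix_drop_iff_isIn]
  constructor
  · rintro ⟨i, _, hp⟩; exact ⟨i, hp⟩
  · rintro ⟨j, hp⟩
    by_cases hj : j < msg.length
    · exact ⟨j, hj, hp⟩
    · exfalso
      have : msg.drop j = [] := List.drop_eq_nil_of_le (by omega)
      rw [this] at hp
      exact hk (List.prefix_nil.mp hp)

-- master lemma: B's position/priority scan from init 2 computes A's two-stage any-test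
theorem pv_best_eq (msg : List Char) (t : List (String × Nat))
    (h01 : ∀ kp ∈ t, kp.2 = 0 ∨ kp.2 = 1)
    (hne : ∀ kp ∈ t, kp.1.toList ≠ []) :
    (List.range msg.length).foldl
      (fun best i => t.foldl
        (fun b kp => if kp.2 < b ∧ PySem.Chars.startswith (msg.drop i) kp.1.toList then kp.2 else b)
        best) 2
    = if ∃ kp ∈ t, kp.2 = 0 ∧ PySem.Chars.isIn kp.1.toList msg = true then 0
      else if ∃ kp ∈ t, kp.2 = 1 ∧ PySem.Chars.isIn kp.1.toList msg = true then 1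
      else 2 := by
  have hstep : ∀ b : Nat, ∀ i : Nat,
      t.foldl (fun b kp => if kp.2 < b ∧ PySem.Chars.startswith (msg.drop i) kp.1.toList then kp.2 else b) b
      = ((fun i => t.filterMap (fun kp => if PySem.Chars.startswith (msg.drop i) kp.1.toList then some kp.2 else none)) i).foldl min b := by
    intro b i; rw [pv_inner_min, pv_foldl_min_filterMap]
  have hfun : (fun (best : Nat) (i : Nat) => t.foldl
        (fun b kp => if kp.2 < b ∧ PySem.Chars.startswith (msg.drop i) kp.1.toList then kp.2 else b) best)
      = (fun b i => (t.filterMap (fun kp => if PySem.Chars.startswith (msg.drop i) kp.1.toList then some kp.2 else none)).foldl min b) := by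
    funext b i; exact hstep b i
  rw [hfun, pv_foldl_foldl_min]
  set L := (List.range msg.length).flatMap (fun i => t.filterMap (fun kp => if PySem.Chars.startswith (msg.drop i) kp.1.toList then some kp.2 else none)) with hL
  have hmem : ∀ k : Nat, k ∈ L ↔ ∃ kp ∈ t, kp.2 = k ∧ ∃ i, i < msg.length ∧ PySem.Chars.startswith (msg.drop i) kp.1.toList := by
    intro k
    simp only [hL, List.mem_flatMap, List.mem_range, List.mem_filterMap]
    constructor
    · rintro ⟨i, hi, kp, hkp, hcond⟩
      by_cases hc : PySem.Chars.startswith (msg.drop i) kp.1.toList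
      · simp [hc] at hcond; exact ⟨kp, hkp, hcond, i, hi, hc⟩
      · simp [hc] at hcond
    · rintro ⟨kp, hkp, rfl, i, hi, hc⟩
      exact ⟨i, hi, kp, hkp, by simp [hc]⟩
  have hmem' : ∀ k : Nat, k ∈ L ↔ ∃ kp ∈ t, kp.2 = k ∧ PySem.Chars.isIn kp.1.toList msg = true := by
    intro k
    rw [hmem k]
    constructor
    · rintro ⟨kp, hkp, hk, i, hi, hc⟩
      refine ⟨kp, hkp, hk, (pv_exists_lt_prefix_iff msg _ (hne kp hkp)).mp ⟨i, hi, ?_⟩⟩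
      exact (PySem.Chars.startswith_iff _ _).mp hc
    · rintro ⟨kp, hkp, hk, hin⟩
      obtain ⟨i, hi, hp⟩ := (pv_exists_lt_prefix_iff msg _ (hne kp hkp)).mpr hin
      exact ⟨kp, hkp, hk, i, hi, (PySem.Chars.startswith_iff _ _).mpr hp⟩
  have hall : ∀ x ∈ L, x = 0 ∨ x = 1 := by
    intro x hx
    obtain ⟨kp, hkp, hk, _⟩ := (hmem' x).mp hx
    exact hk ▸ h01 kp hkp
  rw [pv_foldl_min_char L 2 hall (Or.inr rfl)]
  by_cases h0 : (0:Nat) ∈ L <;> by_cases h1 : (1:Nat) ∈ L <;>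
    simp [h0, h1, ← hmem' 0, ← hmem' 1]

-- pvLabels has no key besides the three levels
theorem pvLabels_none (level : String) (h1 : level ≠ "ERROR") (h2 : level ≠ "WARNING") (h3 : level ≠ "INFO") :
    pvLabels.get? level = none := by
  have e1 : ("ERROR" == level) = false := by simpa using Ne.symm h1
  have e2 : ("WARNING" == level) = false := by simpa using Ne.symm h2
  have e3 : ("INFO" == level) = false := by simpa using Ne.symm h3
  have hmk : pvLabels = PySem.Dict.mk
    [ ("ERROR", ["High: Critical Error", "High: Security Risk", "Medium: General Error"]),
      ("WARNING", ["Low: Update Recommended", "Medium: Performance", "Low: General Warning"]),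
      ("INFO", ["Info: Success", "Medium: Connectivity", "Info: General"]) ] := rfl
  rw [hmk]
  simp only [PySem.Dict.get?_mk_cons, e1, e2, e3, if_false, Bool.false_eq_true]
  rfl

-- ===== VERDICT (by name: the statement is the Claim_ definition above) =====
theorem tag_risks_spec : Claim_equal_tag_risks := by
  intro level message _
  unfold Spec_tag_risks tag_risks tag_risks_alt
  have hml := PySem.Str.toList_lower message
  by_cases h1 : level = "ERROR"
  · subst h1
    simp only [show ("ERROR" == "ERROR") = true from rfl, if_true,
      show pvLabels.get? "ERROR" = some ["High: Critical Error", "High: Security Risk", "Medium: General Error"] from rfl,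
      show pvKeywords.get? "ERROR" = some [("nullreference",(0:Nat)), ("null pointer",0), ("crash",0), ("fatal",0), ("critical",0), ("buffer overflow",1), ("stack overflow",1), ("security",1), ("vulnerability",1)] from rfl,
      Option.getD_some]
    rw [show (["High: Critical Error", "High: Security Risk", "Medium: General Error"] : List String).length - 1 = 2 from rfl,
        pv_best_eq _ _ (by decide) (by decide)]
    simp only [PySem.Str.isIn_eq, hml]
    split_ifs <;> simp_all
  · by_cases h2 : level = "WARNING"
    · subst h2
      simp only [show ("WARNING" == "ERROR") = false from rfl, show ("WARNING" == "WARNING") = true from rfl,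
        Bool.false_eq_true, if_false, if_true,
        show pvLabels.get? "WARNING" = some ["Low: Update Recommended", "Medium: Performance", "Low: General Warning"] from rfl,
        show pvKeywords.get? "WARNING" = some [("deprecated",(0:Nat)), ("obsolete",0), ("outdated",0), ("memory",1), ("leak",1), ("performance",1), ("slow",1), ("lag",1)] from rfl,
        Option.getD_some]
      rw [show (["Low: Update Recommended", "Medium: Performance", "Low: General Warning"] : List String).length - 1 = 2 from rfl,
          pv_best_eq _ _ (by decide) (by decide)]
      simp only [PySem.Str.isIn_eq, hml]
      split_ifs <;> simp_all
    · by_cases h3 : level = "INFO"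
      · subst h3
        simp only [show ("INFO" == "ERROR") = false from rfl, show ("INFO" == "WARNING") = false from rfl,
          show ("INFO" == "INFO") = true from rfl, Bool.false_eq_true, if_false, if_true,
          show pvLabels.get? "INFO" = some ["Info: Success", "Medium: Connectivity", "Info: General"] from rfl,
          show pvKeywords.get? "INFO" = some [("success",(0:Nat)), ("ready",0), ("complete",0), ("loaded",0), ("connected",0), ("started",0), ("timeout",1), ("connection failed",1), ("network error",1), ("corrupt",1)] from rfl,
          Option.getD_some]
        rw [show (["Info: Success", "Medium: Connectivity", "Info: General"] : List String).length - 1 = 2 from rfl,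
            pv_best_eq _ _ (by decide) (by decide)]
        simp only [PySem.Str.isIn_eq, hml]
        split_ifs <;> simp_all
      · have e1 : (level == "ERROR") = false := by simpa using h1
        have e2 : (level == "WARNING") = false := by simpa using h2
        have e3 : (level == "INFO") = false := by simpa using h3
        rw [pvLabels_none level h1 h2 h3]
        simp only [e1, e2, e3, Bool.false_eq_true, if_false]
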